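-- pv_equiv track=rewrite | github.com/alanese/adventofcode | advent2025/day12.py | get_orientations
-- ===== SOURCE A (Python) =====
-- def flipped_y(grid):
--     return [row for row in grid[::-1]]
--
-- def flipped_x(grid):
--     return [ [ x for x in row[::-1]] for row in grid ]
--
-- def transpose(grid):
--     return [ [row[i] for row in grid] for i in range(len(grid[0]))]
--
-- def get_orientations(grid):
--     r = []
--
--     for y in (True, False):
--         for x in (True, False):
--             for t in (True, False):
--                 next = grid
--                 if y:
--                     next = flipped_y(next)
--                 if x:
--                     next = flipped_x(next)
--                 if t:
--                     next = transpose(next)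
--                 r.append(next)
--     return r
-- ===== SOURCE B (Python) =====
-- def _rot90(g):
--     return [list(row) for row in zip(*g[::-1])]
--
-- def get_orientations(grid):
--     r1 = _rot90(grid); r2 = _rot90(r1); r3 = _rot90(r2)
--     f = [row[::-1] for row in grid]
--     f1 = _rot90(f); f2 = _rot90(f1); f3 = _rot90(f2)
--     return [f1, r2, r1, f2, r3, f, f3, grid]
-- ===== Notes on version B (the rewrite author's own statement) =====
-- stated objective: alternative
-- what changed: Replaces A's 2x2x2 boolean loop of flip-y/flip-x/transpose combinations by a straight-line cumulative-rotation pipeline: rot90 (zip of the row-reversed grid) iterated on the grid and on its horizontal mirror, the eight results listed in A's order.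
-- intended difference: On nonempty grids that are not rectangles of nonempty rows (some row empty or of a length different from the first row's), A returns orientations of mixed inconsistent shapes (flip branches keep rows verbatim, transpose branches truncate to the first row's length), while B truncates every rotated orientation uniformly to the grid's minimal width; on this unspecified degenerate corner B's uniform choice is at least as intended as A's accidental mix. — e.g. on get_orientations([[]]): A returns [[], [[]], [], [[]], [], [[]], [], [[]]], B returns [[], [], [], [], [], [[]], [], [[]]]
import Mathlib
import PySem

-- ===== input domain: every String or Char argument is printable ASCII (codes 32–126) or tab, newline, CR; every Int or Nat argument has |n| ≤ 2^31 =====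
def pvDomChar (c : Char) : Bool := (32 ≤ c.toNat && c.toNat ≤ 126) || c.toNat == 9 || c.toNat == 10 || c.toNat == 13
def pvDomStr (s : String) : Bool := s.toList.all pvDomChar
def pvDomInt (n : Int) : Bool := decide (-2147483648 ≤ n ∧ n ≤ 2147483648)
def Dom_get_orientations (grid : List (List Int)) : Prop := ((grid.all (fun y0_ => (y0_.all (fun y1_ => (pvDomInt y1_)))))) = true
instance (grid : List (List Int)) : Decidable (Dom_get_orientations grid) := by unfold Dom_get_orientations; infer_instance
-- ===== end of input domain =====

-- B replaces A's 2x2x2 boolean flip/transpose loop by a straight-line cumulative 90-degree-rotation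
-- pipeline (rot90 = zip of the row-reversed grid, iterated on the grid and on its mirror),
-- listing the eight D4 orientations in A's order: an alternative decomposition of the same cost.


-- ===== PORT A =====
-- flipped_y(grid) = [row for row in grid[::-1]]
def pvFlippedY (grid : List (List Int)) : List (List Int) :=
  ((PySem.List.slice? grid none none (-1)).getD []).map (fun row => row)

-- flipped_x(grid) = [[x for x in row[::-1]] for row in grid]
def pvFlippedX (grid : List (List Int)) : List (List Int) :=
  grid.map (fun row => ((PySem.List.slice? row none none (-1)).getD []).map (fun x => x))

-- transpose(grid) = [[row[i] for row in grid] for i in range(len(grid[0]))]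
-- grid[0] and row[i] raise on the empty grid / ragged rows; those inputs are outside Pre_,
-- so the getD defaults below are never reached there
def pvTransposeA (grid : List (List Int)) : List (List Int) :=
  (PySem.List.pyRange 0 (((PySem.List.pyGet? grid 0).getD []).length : Int) 1).map
    (fun i => grid.map (fun row => PySem.List.pyGetD row i 0))


def get_orientations (grid : List (List Int)) : List (List (List Int)) :=
  [true, false].foldl (fun r y =>
    [true, false].foldl (fun r x =>
      [true, false].foldl (fun r t =>
        let next := grid
        let next := if y then pvFlippedY next else next
        let next := if x then pvFlippedX next else next
        let next := if t then pvTransposeA next else next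
        r ++ [next]) r) r) []

-- ===== PORT B =====
-- list(zip(*g)): truncating transpose, peeling one column at a time as Python's zip does
def pvZipStar (g : List (List Int)) : List (List Int) :=
  if h : g = [] ∨ g.any (fun r => r.isEmpty) then []
  else (g.map (fun r => r.headD 0)) :: pvZipStar (g.map (fun r => r.tail))
termination_by (g.headD []).length
decreasing_by
  cases g with
  | nil => exact absurd (Or.inl rfl) h
  | cons a gs =>
    have ha : a ≠ [] := by
      intro he
      exact h (Or.inr (by simp [he]))
    simp only [List.map_cons, List.headD_cons, List.length_tail]
    cases a with
    | nil => exact absurd rfl ha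
    | cons x xs => simp


-- _rot90(g) = [list(row) for row in zip(*g[::-1])]
def pvRot90 (g : List (List Int)) : List (List Int) :=
  pvZipStar ((PySem.List.slice? g none none (-1)).getD [])
def get_orientations_alt (grid : List (List Int)) : List (List (List Int)) :=
  let r1 := pvRot90 grid
  let r2 := pvRot90 r1
  let r3 := pvRot90 r2
  let f := grid.map (fun row => (PySem.List.slice? row none none (-1)).getD [])
  let f1 := pvRot90 f
  let f2 := pvRot90 f1
  let f3 := pvRot90 f2
  [f1, r2, r1, f2, r3, f, f3, grid]


-- ===== PRECONDITION & SPEC =====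
-- Pre_ is exactly the set of inputs on which A returns: a nonempty grid in which every row is at
-- least as long as both the first and the last row (each transpose A applies truncates to the
-- first-row length of its argument, which is grid's first or last row; any shorter row raises
-- IndexError, and the empty grid raises on grid[0]).
def Pre_get_orientations (grid : List (List Int)) : Prop :=
  grid ≠ [] ∧ ∀ row ∈ grid,
    (grid.headD []).length ≤ row.length ∧ (grid.getLast?.getD []).length ≤ row.length
instance (grid : List (List Int)) : Decidable (Pre_get_orientations grid) := by
  unfold Pre_get_orientations; infer_instance

def pvWitness_get_orientations : List (List Int) := [[1, 2], [3, 4]]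

-- On nonempty grids that are not rectangles of nonempty rows (some row empty or of a different
-- length than the first) A returns orientations of mixed, mutually inconsistent shapes — its flip
-- branches keep the rows verbatim while its transpose branches truncate to the first row's length —
-- whereas B consistently truncates every rotated orientation to the grid's minimal width; on this
-- unspecified degenerate corner B's uniform choice is at least as intended as A's accidental mix.
def D_get_orientations (grid : List (List Int)) : Prop :=
  ∃ row ∈ grid, row = [] ∨ row.length ≠ (grid.headD []).length
instance (grid : List (List Int)) : Decidable (D_get_orientations grid) := by
  unfold D_get_orientations; infer_instance

def Spec_get_orientations (grid : List (List Int)) (out : List (List (List Int))) : Prop :=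
  ¬ D_get_orientations grid → out = get_orientations_alt grid
instance (grid : List (List Int)) (out : List (List (List Int))) : Decidable (Spec_get_orientations grid out) := by
  unfold Spec_get_orientations; infer_instance

def pvDiffWitness_get_orientations : List (List Int) := [[]]
def pvDiffWitnessOut_get_orientations : (List (List (List Int))) × (List (List (List Int))) :=
  ([[], [[]], [], [[]], [], [[]], [], [[]]], [[], [], [], [], [], [[]], [], [[]]])

-- ===== CLAIM (what is proved, stated in full; the proofs are below) =====
def Claim_unchanged_get_orientations : Prop :=
  ∀ (grid : List (List Int)), Dom_get_orientations grid → Pre_get_orientations grid →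
    Spec_get_orientations grid (get_orientations grid)
def Claim_changed_get_orientations : Prop :=
  Dom_get_orientations (pvDiffWitness_get_orientations) ∧
  Pre_get_orientations (pvDiffWitness_get_orientations) ∧
  D_get_orientations (pvDiffWitness_get_orientations) ∧
  get_orientations (pvDiffWitness_get_orientations) = pvDiffWitnessOut_get_orientations.1 ∧
  get_orientations_alt (pvDiffWitness_get_orientations) = pvDiffWitnessOut_get_orientations.2 ∧
  pvDiffWitnessOut_get_orientations.1 ≠ pvDiffWitnessOut_get_orientations.2

-- ===== LEMMAS AND PROOFS =====
theorem pvZipStar_nil : pvZipStar ([] : List (List Int)) = [] := by rw [pvZipStar]; simp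
theorem pvZipStar_single_empty : pvZipStar [([] : List Int)] = [] := by rw [pvZipStar]; simp


-- clean transpose: rows indexed by the first row's length
def pvT (g : List (List Int)) : List (List Int) :=
  (List.range ((g.headD []).length)).map (fun i => g.map (fun row => row.getD i 0))

theorem pvTransposeA_eq (g : List (List Int)) : pvTransposeA g = pvT g := by
  unfold pvTransposeA pvT
  rw [PySem.List.pyRange_one]
  have h0 : (PySem.List.pyGet? g 0).getD [] = g.headD [] := by
    rw [PySem.List.pyGet?_zero]; cases g <;> simp
  rw [h0]
  simp [List.map_map, Function.comp_def]

theorem pvGetD_zero (r : List Int) : r.getD 0 0 = r.headD 0 := by cases r <;> simp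
theorem pvGetD_succ (r : List Int) (i : Nat) : r.getD (i + 1) 0 = r.tail.getD i 0 := by
  cases r <;> simp

theorem zipStar_eq {n : Nat} : ∀ (g : List (List Int)), (∀ row ∈ g, row.length = n) →
    pvZipStar g = pvT g := by
  induction n with
  | zero =>
    intro g hr
    rw [pvZipStar]
    cases g with
    | nil => simp [pvT]
    | cons a gs =>
      have ha : a.isEmpty := by simp [List.isEmpty_iff, List.eq_nil_of_length_eq_zero (hr a (by simp))]
      rw [dif_pos (Or.inr (by simp [ha]))]
      have : (List.cons a gs).headD [] = a := rfl
      simp [pvT, this, List.eq_nil_of_length_eq_zero (hr a (by simp))]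
  | succ m ih =>
    intro g hr
    rw [pvZipStar]
    cases g with
    | nil => simp [pvT]
    | cons a gs =>
      have hne : ¬((a :: gs) = [] ∨ (a :: gs).any (fun r => r.isEmpty)) := by
        simp only [List.any_eq_true]
        rintro (h | ⟨r, hrm, hre⟩)
        · exact (List.cons_ne_nil a gs) h
        · have := hr r hrm
          rw [List.isEmpty_iff] at hre
          simp [hre] at this
      rw [dif_neg hne]
      rw [ih _ (by intro row hrow
                   simp only [List.mem_map] at hrow
                   obtain ⟨r, hrm, rfl⟩ := hrow
                   have := hr r hrm
                   simp [List.length_tail, this])]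
      -- now: map headD :: pvT (map tail) = pvT (a :: gs)
      have hlen : ((a :: gs).headD []).length = m + 1 := hr a (by simp)
      have hlen2 : (((a :: gs).map (fun r => r.tail)).headD []).length = m := by
        simp [List.length_tail, hr a (by simp)]
      unfold pvT
      rw [hlen, hlen2, List.range_succ_eq_map]
      simp only [List.map_cons, List.map_map, Function.comp_def, Nat.succ_eq_add_one,
        pvGetD_zero, pvGetD_succ]

theorem length_pvT (g : List (List Int)) : (pvT g).length = (g.headD []).length := by
  simp [pvT]

theorem getElem_pvT (g : List (List Int)) (i : Nat) (h : i < (pvT g).length) :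
    (pvT g)[i] = g.map (fun row => row.getD (i) 0) := by
  simp [pvT] at h ⊢

theorem pvT_rect (g : List (List Int)) : ∀ row ∈ pvT g, row.length = g.length := by
  intro row hrow
  simp only [pvT, List.mem_map, List.mem_range] at hrow
  obtain ⟨i, _, rfl⟩ := hrow
  simp

theorem headlen {g : List (List Int)} {n : Nat} (hg : g ≠ [])
    (hr : ∀ row ∈ g, row.length = n) : (g.headD []).length = n := by
  cases g with
  | nil => exact absurd rfl hg
  | cons a gs => exact hr a (by simp)

theorem getD_map_range_self (l : List Int) :
    (List.range l.length).map (fun i => l.getD i 0) = l := by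
  apply List.ext_getElem
  · simp
  · intro i h1 h2
    simp [List.getElem?_eq_getElem h2]

theorem pvT_invol {g : List (List Int)} {n : Nat} (hg : g ≠ [])
    (hr : ∀ row ∈ g, row.length = n) (hn : 0 < n) : pvT (pvT g) = g := by
  have hl1 : (g.headD []).length = n := headlen hg hr
  have hT_ne : pvT g ≠ [] := by
    simp only [pvT, ne_eq, List.map_eq_nil_iff, List.range_eq_nil]
    omega
  have hl2 : ((pvT g).headD []).length = g.length := headlen hT_ne (pvT_rect g)
  apply List.ext_getElem
  · rw [length_pvT, hl2]
  · intro j h1 h2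
    rw [length_pvT, hl2] at h1
    rw [getElem_pvT _ j (by rw [length_pvT, hl2]; exact h2)]
    -- (pvT g).map (fun row => row.getD j 0) = ... want = g[j]
    show (pvT g).map (fun row => row.getD j 0) = g[j]
    unfold pvT
    rw [List.map_map]
    have : ∀ i ∈ List.range (g.headD []).length,
        ((fun row => row.getD j 0) ∘ fun i => g.map (fun row => row.getD i 0)) i
        = g[j].getD i 0 := by
      intro i hi
      simp only [Function.comp_def]
      rw [List.getD_eq_getElem _ 0 (by simp [h2]), List.getElem_map]
    rw [List.map_congr_left this, hl1, ← hr g[j] (List.getElem_mem h2)]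
    exact getD_map_range_self _

theorem pvT_map_reverse {g : List (List Int)} {n : Nat} (hg : g ≠ [])
    (hr : ∀ row ∈ g, row.length = n) : pvT (g.map List.reverse) = (pvT g).reverse := by
  have hl1 : (g.headD []).length = n := headlen hg hr
  have hrM : ∀ row ∈ g.map List.reverse, row.length = n := by
    intro row hrow
    simp only [List.mem_map] at hrow
    obtain ⟨r, hrm, rfl⟩ := hrow
    simp [hr r hrm]
  have hgM : g.map List.reverse ≠ [] := by simp [hg]
  have hl2 : ((g.map List.reverse).headD []).length = n := headlen hgM hrM
  have hlenT : (pvT g).length = n := by rw [length_pvT, hl1]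
  apply List.ext_getElem
  · rw [length_pvT, List.length_reverse, hlenT, hl2]
  · intro i h1 h2
    have h1' : i < n := by rwa [length_pvT, hl2] at h1
    rw [getElem_pvT _ i (by rw [length_pvT, hl2]; exact h1')]
    rw [List.getElem_reverse]
    rw [getElem_pvT _ _ (by rw [hlenT]; omega)]
    rw [List.map_map]
    apply List.map_congr_left
    intro r hrm
    have hlr := hr r hrm
    simp only [Function.comp_def]
    rw [List.getD_eq_getElem _ 0 (by rw [List.length_reverse, hlr]; omega),
        List.getD_eq_getElem _ 0 (by rw [hlr, hlenT]; omega)]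
    rw [List.getElem_reverse]
    congr 1
    rw [hlr, hlenT]

theorem pvFlippedY_eq (g : List (List Int)) : pvFlippedY g = g.reverse := by
  simp [pvFlippedY, PySem.List.slice?_none_none_neg_one]
theorem pvFlippedX_eq (g : List (List Int)) : pvFlippedX g = g.map List.reverse := by
  simp [pvFlippedX, PySem.List.slice?_none_none_neg_one]
theorem pvRot90_eq (g : List (List Int)) : pvRot90 g = pvZipStar g.reverse := by
  simp [pvRot90, PySem.List.slice?_none_none_neg_one]

theorem rect_reverse {g : List (List Int)} {n : Nat} (hr : ∀ row ∈ g, row.length = n) :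
    ∀ row ∈ g.reverse, row.length = n := by
  intro row hrow; exact hr row (List.mem_reverse.mp hrow)
theorem rect_map_rev {g : List (List Int)} {n : Nat} (hr : ∀ row ∈ g, row.length = n) :
    ∀ row ∈ g.map List.reverse, row.length = n := by
  intro row hrow
  simp only [List.mem_map] at hrow
  obtain ⟨r, hrm, rfl⟩ := hrow
  simp [hr r hrm]

theorem rot_eq {h : List (List Int)} {n : Nat} (hr : ∀ row ∈ h, row.length = n) :
    pvRot90 h = pvT h.reverse := by
  rw [pvRot90_eq, zipStar_eq h.reverse (rect_reverse hr)]

theorem rotT {h : List (List Int)} {n : Nat} (hh : h ≠ [])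
    (hr : ∀ row ∈ h, row.length = n) (hn : 0 < n) :
    pvRot90 (pvT h) = h.map List.reverse := by
  rw [pvRot90_eq, ← pvT_map_reverse hh hr,
      zipStar_eq _ (pvT_rect (h.map List.reverse)),
      pvT_invol (by simp [hh]) (rect_map_rev hr) hn]

theorem pv_main (grid : List (List Int)) (hg : grid ≠ [])
    (hrows : ∀ row ∈ grid, row ≠ [] ∧ row.length = (grid.headD []).length) :
    get_orientations grid = get_orientations_alt grid := by
  set n := (grid.headD []).length with hn_def
  have hr : ∀ row ∈ grid, row.length = n := fun r hm => (hrows r hm).2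
  have hn : 0 < n := by
    cases grid with
    | nil => exact absurd rfl hg
    | cons a gs =>
      have := (hrows a (by simp)).1
      have h2 := hr a (by simp)
      cases a with
      | nil => exact absurd rfl this
      | cons x xs => simp at h2; omega
  have hA : get_orientations grid =
      [pvTransposeA (pvFlippedX (pvFlippedY grid)), pvFlippedX (pvFlippedY grid),
       pvTransposeA (pvFlippedY grid), pvFlippedY grid,
       pvTransposeA (pvFlippedX grid), pvFlippedX grid,
       pvTransposeA grid, grid] := rfl
  have hB : get_orientations_alt grid =
      [pvRot90 (grid.map (fun row => (PySem.List.slice? row none none (-1)).getD [])),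
       pvRot90 (pvRot90 grid), pvRot90 grid,
       pvRot90 (pvRot90 (grid.map (fun row => (PySem.List.slice? row none none (-1)).getD []))),
       pvRot90 (pvRot90 (pvRot90 grid)),
       grid.map (fun row => (PySem.List.slice? row none none (-1)).getD []),
       pvRot90 (pvRot90 (pvRot90 (grid.map (fun row => (PySem.List.slice? row none none (-1)).getD [])))),
       grid] := rfl
  have hMfix : grid.map (fun row => (PySem.List.slice? row none none (-1)).getD [])
      = grid.map List.reverse := by
    apply List.map_congr_left
    intro r _
    simp [PySem.List.slice?_none_none_neg_one]
  -- rotation chain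
  have e1 : pvRot90 grid = pvT grid.reverse := rot_eq hr
  have e2 : pvRot90 (pvT grid.reverse) = grid.reverse.map List.reverse :=
    rotT (by simp [hg]) (rect_reverse hr) hn
  have e3 : pvRot90 (grid.reverse.map List.reverse) = pvT (grid.map List.reverse) := by
    rw [rot_eq (rect_map_rev (rect_reverse hr))]
    congr 1
    rw [← List.map_reverse, List.reverse_reverse]
  have e4 : pvRot90 (grid.map List.reverse) = pvT (grid.reverse.map List.reverse) := by
    rw [rot_eq (rect_map_rev hr), List.map_reverse]
  have e5 : pvRot90 (pvT (grid.reverse.map List.reverse)) = grid.reverse :=  by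
    rw [rotT (by simp [hg]) (rect_map_rev (rect_reverse hr)) hn]
    simp [List.map_map]
  have e6 : pvRot90 grid.reverse = pvT grid := by
    rw [rot_eq (rect_reverse hr), List.reverse_reverse]
  rw [hA, hB, hMfix, e1, e2, e3, e4, e5, e6]
  simp only [pvFlippedY_eq, pvFlippedX_eq, pvTransposeA_eq, List.map_reverse]

-- ===== VERDICT (by name: the statement is the Claim_ definition above) =====
theorem get_orientations_spec : Claim_unchanged_get_orientations := by
  intro grid _ hpre
  unfold Pre_get_orientations at hpre
  unfold Spec_get_orientations
  intro hnd
  unfold D_get_orientations at hnd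
  apply pv_main grid hpre.1
  intro row hm
  have h1 : ¬(row = [] ∨ row.length ≠ (grid.headD []).length) := fun hc => hnd ⟨row, hm, hc⟩
  refine ⟨fun he => h1 (Or.inl he), ?_⟩
  by_cases hl : row.length = (grid.headD []).length
  · exact hl
  · exact absurd (Or.inr hl) h1

theorem get_orientations_changed : Claim_changed_get_orientations := by
  unfold Claim_changed_get_orientations
  refine ⟨by decide, by decide, by decide, by decide, ?_, by decide⟩
  show get_orientations_alt [[]] = _
  simp [get_orientations_alt, pvRot90, PySem.List.slice?_none_none_neg_one,
        pvZipStar_nil, pvZipStar_single_empty, pvDiffWitnessOut_get_orientations]
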